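-- pv_equiv track=rewrite | github.com/Lydia-No/symbolic-cube-explorer | src/cube_explorer/mirrorwalk/metrics.py | find_first_loop
-- ===== SOURCE A (Python) =====
-- from typing import Dict, Iterable, List, Optional, Tuple
--
-- def find_first_loop(path: List[int]) -> Tuple[bool, Optional[int], Optional[int]]:
--     seen: Dict[int, int] = {}
--     for i, s in enumerate(path):
--         if s in seen:
--             start = seen[s]
--             return True, start, i - start
--         seen[s] = i
--     return False, None, None
-- ===== SOURCE B (Python) =====
-- from typing import Dict, Iterable, List, Optional, Tuple
--
-- def find_first_loop(path: List[int]) -> Tuple[bool, Optional[int], Optional[int]]: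
--     # Stage 1: group occurrences — record each value's first index, and at its
--     # second occurrence record the (start, end) pair of the loop it closes.
--     first: Dict[int, int] = {}
--     loops: Dict[int, Tuple[int, int]] = {}
--     for i, s in enumerate(path):
--         if s not in first:
--             first[s] = i
--         elif s not in loops:
--             loops[s] = (first[s], i)
--     # Stage 2: the first repeat overall is the loop with the smallest end index.
--     best: Optional[Tuple[int, int]] = None
--     for start, end in loops.values():
--         if best is None or end < best[1]:
--             best = (start, end)
--     if best is None:
--         return False, None, None
--     return True, best[0], best[1] - best[0]
-- ===== Notes on version B (the rewrite author's own statement) =====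
-- stated objective: alternative
-- what changed: Replaces A's single early-returning scan with two staged passes: one full pass groups every value's first and second occurrence into a loops table (no early exit), then a second pass minimizes over the recorded loop ends to pick the earliest repeat.
import Mathlib
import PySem

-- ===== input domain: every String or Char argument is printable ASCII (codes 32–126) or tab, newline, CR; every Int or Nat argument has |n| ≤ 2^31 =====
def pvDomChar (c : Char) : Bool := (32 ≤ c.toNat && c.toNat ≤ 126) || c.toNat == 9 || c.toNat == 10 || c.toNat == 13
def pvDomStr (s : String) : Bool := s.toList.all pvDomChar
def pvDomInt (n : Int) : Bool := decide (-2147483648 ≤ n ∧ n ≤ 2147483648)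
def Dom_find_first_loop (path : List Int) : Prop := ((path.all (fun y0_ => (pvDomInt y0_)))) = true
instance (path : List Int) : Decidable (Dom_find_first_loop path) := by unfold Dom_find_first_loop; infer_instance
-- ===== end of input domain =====

-- B replaces A's early-returning scan with two staged passes: a full grouping pass recording each value's (first, second) occurrence pair, then a minimization pass over the recorded loop ends (alternative decomposition, same return values).


-- ===== PORT A =====
-- loop over enumerate(path) with the 'seen' dict; early return = recursion result
def findLoopA (seen : PySem.Dict Int Int) : List (Int × Int) → Bool × Option Int × Option Int
  | [] => (false, none, none)
  | (i, s) :: rest =>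
    match seen.get? s with
    | some start => (true, some start, some (i - start))
    | none => findLoopA (seen.insert s i) rest

def find_first_loop (path : List Int) : Bool × Option Int × Option Int :=
  findLoopA PySem.Dict.empty (PySem.List.enumerate path 0)

-- ===== PORT B =====
-- stage 1: the grouping loop over enumerate(path), building (first, loops)
def buildFL (fl : PySem.Dict Int Int × PySem.Dict Int (Int × Int)) :
    List (Int × Int) → PySem.Dict Int Int × PySem.Dict Int (Int × Int)
  | [] => fl
  | (i, s) :: rest =>
    match fl.1.get? s with
    | none => buildFL (fl.1.insert s i, fl.2) rest       -- s not in first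
    | some st =>
      if fl.2.contains s = false then                    -- elif s not in loops
        buildFL (fl.1, fl.2.insert s (st, i)) rest
      else buildFL fl rest

-- stage 2: the minimization loop over loops.values() with accumulator 'best'
def bestLoop (b : Option (Int × Int)) : List (Int × Int) → Option (Int × Int)
  | [] => b
  | (st, en) :: rest =>
    match b with
    | none => bestLoop (some (st, en)) rest
    | some (bs, be) => if en < be then bestLoop (some (st, en)) rest else bestLoop (some (bs, be)) rest

def find_first_loop_alt (path : List Int) : Bool × Option Int × Option Int :=
  let fl := buildFL (PySem.Dict.empty, PySem.Dict.empty) (PySem.List.enumerate path 0)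
  match bestLoop none fl.2.values with
  | none => (false, none, none)
  | some (st, en) => (true, some st, some (en - st))

-- ===== PRECONDITION & SPEC =====
def Spec_find_first_loop (path : List Int) (out : Bool × Option Int × Option Int) : Prop := out = find_first_loop_alt path
instance (path : List Int) (out : Bool × Option Int × Option Int) : Decidable (Spec_find_first_loop path out) := by unfold Spec_find_first_loop; infer_instance

-- ===== CLAIM =====
def Claim_equal_find_first_loop : Prop := ∀ (path : List Int), Dom_find_first_loop path → Spec_find_first_loop path (find_first_loop path)

-- ===== LEMMAS AND PROOFS =====

-- The grouping loop only appends loop entries whose end index is ≥ the current position.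
lemma buildFL_values (rest : List Int) :
    ∀ (f : PySem.Dict Int Int) (l : PySem.Dict Int (Int × Int)) (m : Int),
    ∃ extra, (buildFL (f, l) (PySem.List.enumerate rest m)).2.values = l.values ++ extra
      ∧ ∀ p ∈ extra, m ≤ p.2 := by
  induction rest with
  | nil => intro f l m; exact ⟨[], by simp [PySem.List.enumerate_nil, buildFL], by simp⟩
  | cons s t ih =>
    intro f l m
    rw [PySem.List.enumerate_cons]
    cases hf : f.get? s with
    | none =>
      simp only [buildFL, hf]
      obtain ⟨extra, he, hge⟩ := ih (f.insert s m) l (m + 1)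
      exact ⟨extra, he, fun p hp => by have := hge p hp; omega⟩
    | some st =>
      simp only [buildFL, hf]
      by_cases hc : l.contains s = false
      · simp only [hc, if_true]
        obtain ⟨extra, he, hge⟩ := ih f (l.insert s (st, m)) (m + 1)
        refine ⟨(st, m) :: extra, ?_, ?_⟩
        · rw [he]
          have hv : (l.insert s (st, m)).values = l.values ++ [(st, m)] := by
            simp [PySem.Dict.values, PySem.Dict.items_insert_of_not_contains, hc]
          rw [hv]; simp
        · intro p hp
          rcases List.mem_cons.mp hp with rfl | hp
          · simp
          · have := hge p hp; omega
      · simp only [hc]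
        obtain ⟨extra, he, hge⟩ := ih f l (m + 1)
        exact ⟨extra, he, fun p hp => by have := hge p hp; omega⟩

-- Once the best candidate's end is ≤ every remaining end, the minimization keeps it.
lemma bestLoop_min (l : List (Int × Int)) :
    ∀ (b : Int × Int), (∀ p ∈ l, b.2 ≤ p.2) → bestLoop (some b) l = some b := by
  induction l with
  | nil => intro b _; rfl
  | cons p t ih =>
    rintro ⟨bs, be⟩ h
    obtain ⟨st, en⟩ := p
    have h1 : be ≤ en := h (st, en) (by simp)
    simp only [bestLoop]
    rw [if_neg (by omega)]
    exact ih (bs, be) (fun q hq => h q (by simp [hq]))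

-- Main invariant: A's 'seen' is B's 'first' (= first index in the consumed prefix), B's 'loops' still empty.
lemma findLoop_main (rest : List Int) :
    ∀ (pre : List Int) (seen : PySem.Dict Int Int),
    (∀ x, seen.get? x = (PySem.List.index? pre x).map (fun n => (n : Int))) →
    findLoopA seen (PySem.List.enumerate rest (pre.length : Int))
      = (match bestLoop none
            (buildFL (seen, PySem.Dict.empty) (PySem.List.enumerate rest (pre.length : Int))).2.values with
         | none => (false, none, none)
         | some (st, en) => (true, some st, some (en - st))) := by
  induction rest with
  | nil =>
    intro pre seen H
    simp [PySem.List.enumerate_nil, findLoopA, buildFL, bestLoop, PySem.Dict.empty, PySem.Dict.values]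
  | cons s t ih =>
    intro pre seen H
    rw [PySem.List.enumerate_cons]
    cases hf : seen.get? s with
    | some j =>
      -- repeat: A returns here; B records the loop (j, i) first, and every later
      -- recorded loop ends strictly later, so the minimization returns (j, i).
      simp only [findLoopA, buildFL, hf, PySem.Dict.contains_empty, if_true]
      obtain ⟨extra, he, hge⟩ :=
        buildFL_values t seen (PySem.Dict.empty.insert s (j, (pre.length : Int))) ((pre.length : Int) + 1)
      rw [he]
      have hv : (PySem.Dict.empty.insert s (j, (pre.length : Int))).values
          = [(j, (pre.length : Int))] := by
        simp [PySem.Dict.values, PySem.Dict.items_insert_of_not_contains, PySem.Dict.empty]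
      rw [hv]
      simp only [List.cons_append, List.nil_append, bestLoop]
      rw [bestLoop_min extra (j, (pre.length : Int)) (fun p hp => by have := hge p hp; simp at this ⊢; omega)]
    | none =>
      -- new value: both sides recurse with first extended; loops stays empty.
      simp only [findLoopA, buildFL, hf]
      have H' : ∀ x, (seen.insert s (pre.length : Int)).get? x
          = (PySem.List.index? (pre ++ [s]) x).map (fun n => (n : Int)) := by
        intro x
        by_cases hx : x = s
        · rw [hx]
          have hsm : s ∉ pre := by
            intro hm
            obtain ⟨j, hj⟩ := Option.isSome_iff_exists.mp ((PySem.List.index?_isSome_iff pre s).mpr hm)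
            have h2 := H s
            rw [hf, hj] at h2
            simp at h2
          rw [PySem.Dict.get?_insert_self, PySem.List.index?_append_singleton_self _ s hsm]
          rfl
        · rw [PySem.Dict.get?_insert_of_ne _ _ hx, H x]
          by_cases hxp : x ∈ pre
          · rw [PySem.List.index?_append_of_mem _ hxp]
          · rw [(PySem.List.index?_eq_none_iff pre x).mpr hxp,
                (PySem.List.index?_eq_none_iff (pre ++ [s]) x).mpr (by simp [hxp, hx])]
      have := ih (pre ++ [s]) (seen.insert s (pre.length : Int)) H'
      have hlen : (((pre ++ [s]).length : Int)) = (pre.length : Int) + 1 := by simp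
      rw [hlen] at this
      exact this

-- ===== VERDICT =====
theorem find_first_loop_spec : Claim_equal_find_first_loop := by
  intro path _
  show find_first_loop path = find_first_loop_alt path
  have := findLoop_main path [] PySem.Dict.empty (by intro x; simp [PySem.List.index?_eq_idxOf?])
  simpa [find_first_loop, find_first_loop_alt] using this
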